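-- pv_equiv track=rewrite | github.com/Aryudesu/ABC | 280/ABC280D.py | calc_min
-- ===== SOURCE A (Python) =====
-- def calc_min(N, V):
--     count = 0
--     res = 0
--     num = 0
--     for v in range(V):
--         res += 1
--         num += N
--         tmp = num
--         while True:
--             if tmp % N == 0:
--                 tmp //= N
--                 count += 1
--             else:
--                 break
--         if V <= count:
--             break
--     return res
-- ===== SOURCE B (Python) =====
-- def calc_min(N, V):
--     # Binary search for the least k with k + sum_i floor(k/|N|^i) >= V.
--     M = abs(N)
--
--     def f(k):
--         total = k
--         p = M
--         while p <= k:
--             total += k // p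
--             p *= M
--         return total
--
--     lo = 0
--     hi = max(V, 0)
--     while lo < hi:
--         mid = (lo + hi) // 2
--         if V <= f(mid):
--             hi = mid
--         else:
--             lo = mid + 1
--     return lo
-- ===== Notes on version B (the rewrite author's own statement) =====
-- stated objective: faster
-- what changed: Replaced the linear scan that increments res V times while accumulating N-adic valuations with a binary search on the answer k using the closed-form count f(k) = k + sum_i floor(k/|N|^i) (Legendre-style sum).
import Mathlib
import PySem

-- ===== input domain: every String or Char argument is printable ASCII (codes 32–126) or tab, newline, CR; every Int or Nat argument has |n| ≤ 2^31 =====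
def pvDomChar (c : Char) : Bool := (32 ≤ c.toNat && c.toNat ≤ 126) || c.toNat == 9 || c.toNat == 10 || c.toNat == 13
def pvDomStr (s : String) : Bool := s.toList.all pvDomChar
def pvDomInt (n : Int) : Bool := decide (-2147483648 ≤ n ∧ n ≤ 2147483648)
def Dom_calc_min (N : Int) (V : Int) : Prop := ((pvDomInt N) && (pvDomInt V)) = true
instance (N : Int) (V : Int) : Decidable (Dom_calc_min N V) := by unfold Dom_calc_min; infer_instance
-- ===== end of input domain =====

-- B replaces A's linear scan (accumulating |N|-adic valuations up to V steps) by a binary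
-- search on the answer k against the closed-form count k + Σ_i ⌊k/|N|^i⌋; asymptotically faster.

-- ===== PORT A =====
-- inner `while True` loop: repeatedly divide tmp by N while divisible, counting; fuel |tmp|+1 covers every terminating run
def innerA (N : Int) : Nat → Int → Int → Int
  | 0, _, count => count
  | f+1, tmp, count =>
    if PySem.Int.mod tmp N = 0 then innerA N f (PySem.Int.floordiv tmp N) (count + 1)
    else count

-- `for v in range(V)` with early break; fuel = number of remaining iterations
def outerA (N V : Int) : Nat → Int → Int → Int → Int
  | 0, _, res, _ => res
  | f+1, count, res, num =>
    let res' := res + 1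
    let num' := num + N
    let count' := innerA N (num'.natAbs + 1) num' count
    if V ≤ count' then res' else outerA N V f count' res' num'

def calc_min (N : Int) (V : Int) : Int := outerA N V V.toNat 0 0 0

-- ===== PORT B =====
-- f(k): total = k; while p ≤ k: total += k // p; p *= M.  fuel k.toNat+1 covers every terminating run (p at least doubles)
def fAux (M k : Int) : Nat → Int → Int → Int
  | 0, _, total => total
  | f+1, p, total =>
    if p ≤ k then fAux M k f (p * M) (total + PySem.Int.floordiv k p) else total

def fB (M k : Int) : Int := fAux M k (k.toNat + 1) M k

-- while lo < hi: binary search; fuel hi.toNat+1 covers every terminating run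
def bsearch (M V : Int) : Nat → Int → Int → Int
  | 0, lo, _ => lo
  | f+1, lo, hi =>
    if lo < hi then
      let mid := PySem.Int.floordiv (lo + hi) 2
      if V ≤ fB M mid then bsearch M V f lo mid else bsearch M V f (mid + 1) hi
    else lo

def calc_min_alt (N : Int) (V : Int) : Int :=
  let M := |N|
  let hi := max V 0
  bsearch M V (hi.toNat + 1) 0 hi

-- ===== PRECONDITION & SPEC =====
-- Pre_ excludes only inputs on which Python A never returns: for V ≥ 1, N = 0 raises ZeroDivisionError
-- and N = 1 or N = -1 makes the inner `while True` loop forever.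
def Pre_calc_min (N : Int) (V : Int) : Prop := V ≤ 0 ∨ 2 ≤ N.natAbs
instance (N : Int) (V : Int) : Decidable (Pre_calc_min N V) := by unfold Pre_calc_min; infer_instance
def pvWitness_calc_min : Int × Int := (2, 5)

def Spec_calc_min (N : Int) (V : Int) (out : Int) : Prop := out = calc_min_alt N V
instance (N : Int) (V : Int) (out : Int) : Decidable (Spec_calc_min N V out) := by unfold Spec_calc_min; infer_instance

-- ===== CLAIM (what is proved, stated in full; the proofs are below) =====
def Claim_equal_calc_min : Prop := ∀ (N : Int) (V : Int), Dom_calc_min N V → Pre_calc_min N V → Spec_calc_min N V (calc_min N V)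

-- ===== LEMMAS AND PROOFS =====

-- multiplicity of M (≥ 2) in n
def nu (M : Nat) (n : Nat) : Nat :=
  if h : 2 ≤ M ∧ M ∣ n ∧ n ≠ 0 then nu M (n / M) + 1 else 0
termination_by n
decreasing_by exact Nat.div_lt_self (Nat.pos_of_ne_zero h.2.2) (by omega)

-- cumulative count after res = k iterations of A's loop
def Fc (M : Nat) : Nat → Nat
  | 0 => 0
  | k+1 => Fc M k + 1 + nu M (k+1)

lemma nu_of_dvd {M n : Nat} (hM : 2 ≤ M) (hd : M ∣ n) (hn : n ≠ 0) :
    nu M n = nu M (n / M) + 1 := by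
  rw [nu]; simp [hM, hd, hn]

lemma nu_of_not_dvd {M n : Nat} (hd : ¬ M ∣ n) : nu M n = 0 := by
  rw [nu]; simp [hd]

lemma nu_mul {M n : Nat} (hM : 2 ≤ M) (hn : n ≠ 0) : nu M (n * M) = nu M n + 1 := by
  have h := nu_of_dvd (n := n * M) hM ⟨n, by ring⟩ (by positivity)
  have hdv : n * M / M = n := by
    rw [mul_comm, Nat.mul_div_cancel_left _ (by omega : 0 < M)]
  rwa [hdv] at h

lemma nu_le {M : Nat} (hM : 2 ≤ M) : ∀ n, nu M n ≤ n := by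
  intro n
  induction n using Nat.strong_induction_on with
  | _ n ih =>
    by_cases hd : M ∣ n
    · by_cases hn : n = 0
      · subst hn; rw [nu]; simp
      · rw [nu_of_dvd hM hd hn]
        have h1 : n / M < n := Nat.div_lt_self (Nat.pos_of_ne_zero hn) (by omega)
        have := ih (n / M) h1
        omega
    · rw [nu_of_not_dvd hd]; omega

lemma pow_dvd_iff_le_nu {M : Nat} (hM : 2 ≤ M) :
    ∀ n, n ≠ 0 → ∀ e, (M ^ e ∣ n ↔ e ≤ nu M n) := by
  intro n
  induction n using Nat.strong_induction_on with
  | _ n ih =>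
    intro hn e
    cases e with
    | zero => simp
    | succ e =>
      by_cases hd : M ∣ n
      · obtain ⟨q, hq⟩ := hd
        have hq0 : q ≠ 0 := by rintro rfl; simp at hq; exact hn hq
        have hqlt : q < n := by
          have h1 : 1 * q < M * q :=
            (Nat.mul_lt_mul_right (Nat.pos_of_ne_zero hq0)).mpr (by omega)
          omega
        have hdiv : n / M = q := by rw [hq, Nat.mul_div_cancel_left _ (by omega)]
        rw [nu_of_dvd hM ⟨q, hq⟩ hn, hdiv]
        have hiff := ih q hqlt hq0 e
        have hsw : M ^ (e + 1) ∣ n ↔ M ^ e ∣ q := by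
          rw [hq, pow_succ, mul_comm (M ^ e) M]
          exact Nat.mul_dvd_mul_iff_left (show 0 < M by omega)
        rw [hsw]
        omega
      · rw [nu_of_not_dvd hd]
        constructor
        · intro hpd
          exact absurd (dvd_trans (dvd_pow_self M (Nat.succ_ne_zero e)) hpd) hd
        · intro h; exact absurd h (by omega)

lemma Fc_succ (M k : Nat) : Fc M (k+1) = Fc M k + 1 + nu M (k+1) := rfl

lemma Fc_mono {M : Nat} {a b : Nat} (h : a ≤ b) : Fc M a ≤ Fc M b := by
  induction b with
  | zero => simp_all
  | succ b ih =>
    rcases Nat.lt_or_ge a (b+1) with h1 | h1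
    · have := ih (by omega); rw [Fc_succ]; omega
    · have : a = b + 1 := by omega
      subst this; rfl

lemma le_Fc {M : Nat} : ∀ k, k ≤ Fc M k := by
  intro k; induction k with
  | zero => simp [Fc]
  | succ k ih => rw [Fc_succ]; omega

-- least k with V ≤ Fc M k
lemma Kmin_ex (M : Nat) (V : Int) : ∃ k, V ≤ (Fc M k : Int) := by
  refine ⟨V.toNat, ?_⟩
  have h1 := le_Fc (M := M) V.toNat
  have h2 := Int.self_le_toNat V
  omega

def Kmin (M : Nat) (V : Int) : Nat := Nat.find (Kmin_ex M V)

lemma Kmin_spec {M : Nat} {V : Int} (_hV : 1 ≤ V) :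
    V ≤ (Fc M (Kmin M V) : Int) ∧ ∀ j, j < Kmin M V → (Fc M j : Int) < V := by
  exact ⟨Nat.find_spec (Kmin_ex M V), fun j hj => by
    have := Nat.find_min (Kmin_ex M V) hj; omega⟩

lemma Kmin_le {M : Nat} {V : Int} (k : Nat) (hk : V ≤ (Fc M k : Int)) : Kmin M V ≤ k :=
  Nat.find_min' (Kmin_ex M V) hk

-- ===== A-side correspondence =====

lemma innerA_eq {N : Int} (hM : 2 ≤ N.natAbs) :
    ∀ (f : Nat) (tmp count : Int), tmp ≠ 0 → tmp.natAbs < f →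
      innerA N f tmp count = count + (nu N.natAbs tmp.natAbs : Int) := by
  intro f
  induction f with
  | zero => intro tmp count h1 h2; omega
  | succ f ih =>
    intro tmp count htmp hlt
    rw [innerA]
    by_cases hd : PySem.Int.mod tmp N = 0
    · have hdvd : N ∣ tmp := (PySem.Int.mod_eq_zero_iff_dvd tmp N).mp hd
      have hN : N ≠ 0 := by rintro rfl; simp at hM
      have hqe : PySem.Int.floordiv tmp N * N = tmp := by
        have := PySem.Int.floordiv_mul_add_mod tmp N
        omega
      set q := PySem.Int.floordiv tmp N with hq
      have hq0 : q ≠ 0 := by rintro h; rw [h] at hqe; simp at hqe; omega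
      have habs : q.natAbs * N.natAbs = tmp.natAbs := by
        rw [← Int.natAbs_mul, hqe]
      have hqlt : q.natAbs < tmp.natAbs := by
        have h1 : 1 ≤ q.natAbs := by
          have := Int.natAbs_eq_zero.not.mpr hq0; omega
        nlinarith
      have hnu : nu N.natAbs tmp.natAbs = nu N.natAbs q.natAbs + 1 := by
        have hdvdn : N.natAbs ∣ tmp.natAbs := ⟨q.natAbs, by rw [← habs]; ring⟩
        have htn : tmp.natAbs ≠ 0 := by
          have := Int.natAbs_eq_zero.not.mpr htmp; omega
        have hdivq : tmp.natAbs / N.natAbs = q.natAbs := by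
          rw [← habs, Nat.mul_div_cancel _ (by omega)]
        rw [nu_of_dvd hM hdvdn htn, hdivq]
      rw [if_pos hd, ih q (count + 1) hq0 (by omega), hnu]
      push_cast; ring
    · rw [if_neg hd]
      have hnd : ¬ N.natAbs ∣ tmp.natAbs := by
        intro hdn
        exact hd ((PySem.Int.mod_eq_zero_iff_dvd tmp N).mpr (Int.natAbs_dvd_natAbs.mp hdn))
      rw [nu_of_not_dvd hnd]
      simp

lemma outerA_eq {N V : Int} (hM : 2 ≤ N.natAbs) (hV : 1 ≤ V) :
    ∀ (f : Nat) (r : Nat), (Fc N.natAbs r : Int) < V → Kmin N.natAbs V ≤ r + f →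
      outerA N V f (Fc N.natAbs r) (r : Int) ((r : Int) * N) = (Kmin N.natAbs V : Int) := by
  intro f
  induction f with
  | zero =>
    intro r hlt hK
    exfalso
    have hs := (Kmin_spec (M := N.natAbs) hV).1
    have := Fc_mono (M := N.natAbs) (a := Kmin N.natAbs V) (b := r) (by omega)
    omega
  | succ f ih =>
    intro r hlt hK
    rw [outerA]
    have hN : N ≠ 0 := by rintro rfl; simp at hM
    have hnum : (r : Int) * N + N = ((r+1 : Nat) : Int) * N := by push_cast; ring
    have habs : (((r : Int) * N + N)).natAbs = (r+1) * N.natAbs := by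
      rw [hnum, Int.natAbs_mul, Int.natAbs_natCast]
    have hne : ((r : Int) * N + N) ≠ 0 := by
      rw [hnum]
      exact mul_ne_zero (Int.natCast_ne_zero.mpr (Nat.succ_ne_zero r)) hN
    have hinner : innerA N ((((r : Int)) * N + N).natAbs + 1) ((r : Int) * N + N) (Fc N.natAbs r)
        = (Fc N.natAbs (r+1) : Int) := by
      rw [innerA_eq hM _ _ _ hne (by omega), habs, nu_mul hM (by omega), Fc_succ]
      push_cast; ring
    simp only [hinner]
    by_cases hstop : V ≤ (Fc N.natAbs (r+1) : Int)
    · rw [if_pos hstop]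
      have h1 : Kmin N.natAbs V ≤ r + 1 := Kmin_le _ hstop
      have h2 : ∀ j, j < Kmin N.natAbs V → (Fc N.natAbs j : Int) < V := (Kmin_spec hV).2
      have h3 : r < Kmin N.natAbs V := by
        by_contra hc
        have := Fc_mono (M := N.natAbs) (a := Kmin N.natAbs V) (b := r) (by omega)
        have hs := (Kmin_spec (M := N.natAbs) hV).1
        omega
      have : Kmin N.natAbs V = r + 1 := by omega
      rw [this]; push_cast; ring
    · rw [if_neg hstop]
      have := ih (r+1) (by omega) (by omega)
      push_cast at this ⊢
      convert this using 2

-- ===== B-side correspondence =====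

lemma fAux_eq {M : Nat} (hM : 2 ≤ M) (k : Nat) :
    ∀ (fuel : Nat) (p : Nat) (total : Int), 1 ≤ p → k < p * 2 ^ fuel →
      fAux (M : Int) (k : Int) fuel (p : Int) total
        = total + (∑ i ∈ Finset.range k, k / (p * M ^ i) : Nat) := by
  intro fuel
  induction fuel with
  | zero =>
    intro p total hp hbound
    simp only [pow_zero, mul_one] at hbound
    rw [fAux]
    have hz : ∀ i ∈ Finset.range k, k / (p * M ^ i) = 0 := by
      intro i _
      apply Nat.div_eq_of_lt
      calc k < p := hbound
        _ ≤ p * M ^ i := Nat.le_mul_of_pos_right p (Nat.pow_pos (by omega))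
    rw [Finset.sum_congr rfl hz]
    simp
  | succ fuel ih =>
    intro p total hp hbound
    rw [fAux]
    by_cases hple : (p : Int) ≤ (k : Int)
    · have hplek : p ≤ k := by exact_mod_cast hple
      rw [if_pos hple]
      have hcast : (p : Int) * (M : Int) = ((p * M : Nat) : Int) := by push_cast; ring
      have hfd : PySem.Int.floordiv (k : Int) (p : Int) = ((k / p : Nat) : Int) :=
        PySem.Int.floordiv_natCast k p
      have hrecb : k < p * M * 2 ^ fuel := by
        calc k < p * 2 ^ (fuel + 1) := hbound
          _ = 2 * p * 2 ^ fuel := by ring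
          _ ≤ M * p * 2 ^ fuel :=
              Nat.mul_le_mul (Nat.mul_le_mul hM (le_refl p)) (le_refl (2 ^ fuel))
          _ = p * M * 2 ^ fuel := by ring
      rw [hcast, hfd, ih (p * M) _ (Nat.mul_pos (by omega) (by omega)) hrecb]
      have hsum : (∑ i ∈ Finset.range k, k / (p * M ^ i))
          = k / p + ∑ i ∈ Finset.range k, k / (p * M * M ^ i) := by
        have hlast : k / (p * M ^ k) = 0 := by
          apply Nat.div_eq_of_lt
          have h2 : k < 2 ^ k := Nat.lt_two_pow_self
          calc k < 2 ^ k := h2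
            _ ≤ M ^ k := Nat.pow_le_pow_left (by omega) k
            _ ≤ p * M ^ k := Nat.le_mul_of_pos_left _ (by omega)
        have hshift := Finset.sum_range_succ' (fun i => k / (p * M ^ i)) k
        have hfull := Finset.sum_range_succ (fun i => k / (p * M ^ i)) k
        have harg : ∀ i, k / (p * M ^ (i+1)) = k / (p * M * M ^ i) := by
          intro i; congr 1; rw [pow_succ]; ring
        simp only [harg] at hshift
        simp only [pow_zero, mul_one] at hshift
        omega
      rw [hsum]
      push_cast; ring
    · rw [if_neg hple]
      have hpk : k < p := by omega
      have hz : ∀ i ∈ Finset.range k, k / (p * M ^ i) = 0 := by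
        intro i _
        apply Nat.div_eq_of_lt
        calc k < p := hpk
          _ ≤ p * M ^ i := Nat.le_mul_of_pos_right p (Nat.pow_pos (by omega))
      rw [Finset.sum_congr rfl hz]
      simp

-- indicator sum: ∑_{i<m} [i < t] = min t m
lemma sum_indicator_lt (t m : Nat) :
    (∑ i ∈ Finset.range m, if i < t then 1 else 0) = min t m := by
  induction m with
  | zero => simp
  | succ m ih =>
    rw [Finset.sum_range_succ, ih]
    by_cases h : m < t
    · rw [if_pos h]; omega
    · rw [if_neg h]; omega

-- Legendre: Fc M k = k + ∑_{i<k} k / M^(i+1)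
lemma Fc_legendre {M : Nat} (hM : 2 ≤ M) :
    ∀ k, Fc M k = k + ∑ i ∈ Finset.range k, k / M ^ (i + 1) := by
  intro k
  induction k with
  | zero => simp [Fc]
  | succ k ih =>
    rw [Fc_succ, ih]
    have hstep : ∀ i, (k + 1) / M ^ (i+1) = k / M ^ (i+1) + if M ^ (i+1) ∣ k + 1 then 1 else 0 :=
      fun i => Nat.succ_div
    have hsum : (∑ i ∈ Finset.range (k+1), (k+1) / M ^ (i+1))
        = (∑ i ∈ Finset.range (k+1), k / M ^ (i+1))
          + ∑ i ∈ Finset.range (k+1), (if M ^ (i+1) ∣ k + 1 then 1 else 0) := by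
      rw [← Finset.sum_add_distrib]
      exact Finset.sum_congr rfl (fun i _ => hstep i)
    have hlastzero : k / M ^ (k+1) = 0 := by
      apply Nat.div_eq_of_lt
      calc k < 2 ^ (k+1) := by
              have := Nat.lt_two_pow_self (n := k); omega
        _ ≤ M ^ (k+1) := Nat.pow_le_pow_left (by omega) _
    have hA : (∑ i ∈ Finset.range (k+1), k / M ^ (i+1))
        = ∑ i ∈ Finset.range k, k / M ^ (i+1) := by
      rw [Finset.sum_range_succ, hlastzero]
      simp
    have hind : ∀ i, (if M ^ (i+1) ∣ k + 1 then 1 else 0) = if i < nu M (k+1) then 1 else 0 := by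
      intro i
      congr 1
      have := pow_dvd_iff_le_nu hM (k+1) (by omega) (i+1)
      simp only [eq_iff_iff]
      omega
    have hB : (∑ i ∈ Finset.range (k+1), (if M ^ (i+1) ∣ k + 1 then 1 else 0))
        = nu M (k+1) := by
      simp only [hind]
      rw [sum_indicator_lt]
      have h1 : nu M (k+1) ≤ k + 1 := nu_le hM (k+1)
      omega
    rw [hsum, hA, hB]
    omega

lemma fB_eq {M : Nat} (hM : 2 ≤ M) (k : Nat) :
    fB (M : Int) (k : Int) = (Fc M k : Int) := by
  rw [fB]
  have htn : (k : Int).toNat = k := Int.toNat_natCast k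
  rw [htn]
  rw [fAux_eq hM k (k+1) M k (by omega) (by
    have h2 : k < 2 ^ (k+1) := by have := Nat.lt_two_pow_self (n := k); omega
    calc k < 2 ^ (k+1) := h2
      _ ≤ M * 2 ^ (k+1) := Nat.le_mul_of_pos_left _ (by omega))]
  rw [Fc_legendre hM k]
  have harg : ∀ i, k / (M * M ^ i) = k / M ^ (i+1) := by
    intro i; congr 1; rw [pow_succ]; ring
  simp only [harg]
  push_cast; ring

lemma bsearch_eq {N V : Int} (hM : 2 ≤ N.natAbs) (hV : 1 ≤ V) :
    ∀ (fuel : Nat) (lo hi : Nat), lo ≤ Kmin N.natAbs V → Kmin N.natAbs V ≤ hi →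
      hi - lo < fuel →
      bsearch ((N.natAbs : Nat) : Int) V fuel (lo : Int) (hi : Int) = (Kmin N.natAbs V : Int) := by
  intro fuel
  induction fuel with
  | zero => intro lo hi h1 h2 h3; omega
  | succ fuel ih =>
    intro lo hi h1 h2 h3
    rw [bsearch]
    by_cases hlt : (lo : Int) < (hi : Int)
    · rw [if_pos hlt]
      have hlon : lo < hi := by exact_mod_cast hlt
      have hmid : PySem.Int.floordiv ((lo : Int) + (hi : Int)) 2 = (((lo + hi) / 2 : Nat) : Int) := by
        have : (lo : Int) + (hi : Int) = ((lo + hi : Nat) : Int) := by push_cast; ring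
        rw [this]
        exact_mod_cast PySem.Int.floordiv_natCast (lo + hi) 2
      set midn := (lo + hi) / 2 with hmidn
      have hmlo : lo ≤ midn := by omega
      have hmhi : midn < hi := by omega
      simp only [hmid]
      rw [fB_eq hM midn]
      by_cases hc : V ≤ (Fc N.natAbs midn : Int)
      · rw [if_pos hc]
        exact ih lo midn h1 (Kmin_le _ hc) (by omega)
      · rw [if_neg hc]
        have hKgt : midn < Kmin N.natAbs V := by
          by_contra hcon
          have := Fc_mono (M := N.natAbs) (a := Kmin N.natAbs V) (b := midn) (by omega)
          have hs := (Kmin_spec (M := N.natAbs) hV).1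
          omega
        have : ((midn : Int) + 1) = ((midn + 1 : Nat) : Int) := by push_cast; ring
        rw [this]
        exact ih (midn + 1) hi (by omega) h2 (by omega)
    · rw [if_neg hlt]
      have hlk : lo = Kmin N.natAbs V := by omega
      rw [hlk]

-- ===== VERDICT (by name: the statement is the Claim_ definition above) =====
theorem calc_min_spec : Claim_equal_calc_min := by
  intro N V _ hpre
  unfold Spec_calc_min
  by_cases hV : V ≤ 0
  · have hVt : V.toNat = 0 := by omega
    have hmax : max V 0 = 0 := by omega
    rw [calc_min, calc_min_alt, hVt, hmax]
    simp [outerA, bsearch]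
  · have hV1 : 1 ≤ V := by omega
    have hM : 2 ≤ N.natAbs := by
      rcases hpre with h | h
      · omega
      · exact h
    -- A side
    have hA : calc_min N V = (Kmin N.natAbs V : Int) := by
      rw [calc_min]
      have h0 : (Fc N.natAbs 0 : Int) = 0 := by simp [Fc]
      have hKle : Kmin N.natAbs V ≤ V.toNat := by
        apply Kmin_le
        have h1 := le_Fc (M := N.natAbs) V.toNat
        have h2 : (V.toNat : Int) = V := Int.toNat_of_nonneg (by omega)
        omega
      have := outerA_eq hM hV1 V.toNat 0 (by rw [← h0] at *; simp [Fc]; omega) (by omega)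
      simpa [Fc] using this
    -- B side
    have hB : calc_min_alt N V = (Kmin N.natAbs V : Int) := by
      rw [calc_min_alt]
      have habs : |N| = ((N.natAbs : Nat) : Int) := by
        rw [Int.abs_eq_natAbs]
      have hmax : max V 0 = ((V.toNat : Nat) : Int) := by
        rw [Int.toNat_of_nonneg (by omega)]; omega
      simp only [habs, hmax]
      have htn : (((V.toNat : Nat) : Int)).toNat = V.toNat := Int.toNat_natCast _
      rw [htn]
      have h0 : ((0 : Nat) : Int) = (0 : Int) := rfl
      rw [← h0]
      apply bsearch_eq hM hV1
      · omega
      · apply Kmin_le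
        have h1 := le_Fc (M := N.natAbs) V.toNat
        have h2 : (V.toNat : Int) = V := Int.toNat_of_nonneg (by omega)
        omega
      · omega
    rw [hA, hB]
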